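-- pv_equiv track=rewrite | github.com/CovertLab/vEcoli | ecoli/analysis/multivariant/fba_flux_process.py | find_matching_reactions
-- ===== SOURCE A (Python) =====
-- def find_matching_reactions(reaction_ids, reaction_name, reverse_flag=False):
--     """
--     Find all reaction IDs that match the given reaction name pattern.
--     This is done once per BioCyc ID to avoid repeated string matching.
--
--     Args:
--         reaction_ids (list): List of all reaction IDs in the model
--         reaction_name (str): Root reaction name to search for
--         reverse_flag (bool): If True, search for reverse reactions;
--                            If False, search for forward reactions
--
--     Returns:
--         list: List of matching reaction IDs and their indices
--     """
--
--     matching_reactions = []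
--
--     if reverse_flag:
--         # For reverse reactions, we look for reactions with "(reverse)" suffix
--         # Step 1: Try to find exact reverse name
--         reverse_name = reaction_name + " (reverse)"
--         if reverse_name in reaction_ids:
--             idx = reaction_ids.index(reverse_name)
--             matching_reactions.append((reverse_name, idx))
--
--         # Step 2: Search for extended reverse names with delimiters
--         delimiters = ["_", "[", "-", "/"]
--         for delimiter in delimiters:
--             extend_name = reaction_name + delimiter
--             for idx, reaction_id in enumerate(reaction_ids):
--                 if (
--                     extend_name in reaction_id
--                     and "(reverse)" in reaction_id
--                     and reaction_id not in [r[0] for r in matching_reactions]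
--                 ):
--                     matching_reactions.append((reaction_id, idx))
--
--     else:
--         # For forward reactions, we look for reactions WITHOUT "(reverse)" suffix
--         # Step 1: Try to find exact root name (forward)
--         if reaction_name in reaction_ids and "(reverse)" not in reaction_name:
--             idx = reaction_ids.index(reaction_name)
--             matching_reactions.append((reaction_name, idx))
--
--         # Step 2: Search for extended forward names with delimiters
--         delimiters = ["_", "[", "-", "/"]
--         for delimiter in delimiters:
--             extend_name = reaction_name + delimiter
--             for idx, reaction_id in enumerate(reaction_ids):
--                 if (
--                     extend_name in reaction_id
--                     and "(reverse)" not in reaction_id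
--                     and reaction_id not in [r[0] for r in matching_reactions]
--                 ):
--                     matching_reactions.append((reaction_id, idx))
--
--     return matching_reactions
-- ===== SOURCE B (Python) =====
-- def find_matching_reactions(reaction_ids, reaction_name, reverse_flag=False):
--     """Single pass over reaction_ids: deduplicate by id string with a seen set,
--     classify each first-seen id into one of five rank buckets (exact name first,
--     then one bucket per delimiter, first matching delimiter wins), then
--     concatenate the buckets."""
--     delimiters = ["_", "[", "-", "/"]
--     if reverse_flag:
--         exact_name = reaction_name + " (reverse)"
--         exact_ok = True
--     else:
--         exact_name = reaction_name
--         exact_ok = "(reverse)" not in reaction_name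
--
--     def bucket_of(rid):
--         """Bucket 0 for the exact name, k+1 for the first matching delimiter, else None."""
--         if exact_ok and rid == exact_name:
--             return 0
--         if ("(reverse)" in rid) != reverse_flag:
--             return None
--         for k, d in enumerate(delimiters):
--             if reaction_name + d in rid:
--                 return k + 1
--         return None
--
--     seen = set()
--     buckets = [[], [], [], [], []]
--     for idx, rid in enumerate(reaction_ids):
--         if rid not in seen:
--             seen.add(rid)
--             b = bucket_of(rid)
--             if b is not None:
--                 buckets[b].append((rid, idx))
--     out = []
--     for b in buckets:
--         out.extend(b)
--     return out
-- ===== Notes on version B (the rewrite author's own statement) =====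
-- stated objective: alternative
-- what changed: A probes the exact name and then makes four full passes over reaction_ids (one per delimiter), each with a quadratic 'already matched' rescan of the output list; B makes a single pass that deduplicates ids with a seen set and classifies each first-seen id into one of five rank buckets (exact, then first matching delimiter), concatenated at the end.
import Mathlib
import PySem

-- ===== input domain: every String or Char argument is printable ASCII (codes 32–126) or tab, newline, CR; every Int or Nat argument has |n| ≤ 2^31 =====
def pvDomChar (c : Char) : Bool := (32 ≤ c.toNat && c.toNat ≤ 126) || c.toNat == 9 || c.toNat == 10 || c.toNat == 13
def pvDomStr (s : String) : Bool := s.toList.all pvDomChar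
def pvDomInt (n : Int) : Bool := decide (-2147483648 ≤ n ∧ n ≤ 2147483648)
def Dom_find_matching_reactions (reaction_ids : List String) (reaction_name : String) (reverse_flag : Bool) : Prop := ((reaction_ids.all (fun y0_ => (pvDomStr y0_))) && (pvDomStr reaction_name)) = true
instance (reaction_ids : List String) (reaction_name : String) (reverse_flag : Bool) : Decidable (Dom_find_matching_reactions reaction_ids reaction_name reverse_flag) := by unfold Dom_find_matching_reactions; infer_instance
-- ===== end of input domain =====

-- B replaces A's exact-name probe plus four full passes (each with a quadratic
-- "already matched" list scan) by a single deduplicating pass that classifies each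
-- first-seen id into one of five rank buckets, concatenated at the end (objective: alternative).


-- ===== PORT A =====
def find_matching_reactions (reaction_ids : List String) (reaction_name : String) (reverse_flag : Bool) : List (String × Int) :=
  if reverse_flag then
    -- Step 1: exact reverse name
    let reverse_name := reaction_name ++ " (reverse)"
    let matching0 : List (String × Int) :=
      if reaction_ids.contains reverse_name then
        match PySem.List.index? reaction_ids reverse_name with
        | some idx => [(reverse_name, (idx : Int))]
        | none => []
      else []
    -- Step 2: extended reverse names with delimiters
    ["_", "[", "-", "/"].foldl (fun matching delimiter =>
      (PySem.List.enumerate reaction_ids 0).foldl (fun matching p =>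
        if PySem.Str.isIn (reaction_name ++ delimiter) p.2 &&
           (PySem.Str.isIn "(reverse)" p.2 && !(matching.map Prod.fst).contains p.2)
        then matching ++ [(p.2, p.1)] else matching) matching) matching0
  else
    -- Step 1: exact root name (forward)
    let matching0 : List (String × Int) :=
      if reaction_ids.contains reaction_name && !PySem.Str.isIn "(reverse)" reaction_name then
        match PySem.List.index? reaction_ids reaction_name with
        | some idx => [(reaction_name, (idx : Int))]
        | none => []
      else []
    -- Step 2: extended forward names with delimiters
    ["_", "[", "-", "/"].foldl (fun matching delimiter =>
      (PySem.List.enumerate reaction_ids 0).foldl (fun matching p =>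
        if PySem.Str.isIn (reaction_name ++ delimiter) p.2 &&
           (!PySem.Str.isIn "(reverse)" p.2 && !(matching.map Prod.fst).contains p.2)
        then matching ++ [(p.2, p.1)] else matching) matching) matching0

-- ===== PORT B =====
-- the inner `for k, d in enumerate(delimiters): if …: return k + 1` loop of bucket_of
def fmrBucketDelims (reaction_name rid : String) : List String → Nat → Option Nat
  | [], _ => none
  | d :: rest, k =>
    if PySem.Str.isIn (reaction_name ++ d) rid then some (k + 1)
    else fmrBucketDelims reaction_name rid rest (k + 1)

def fmrBucketOf (reaction_name exact_name : String) (exact_ok reverse_flag : Bool)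
    (delimiters : List String) (rid : String) : Option Nat :=
  if exact_ok && rid == exact_name then some 0
  else if PySem.Str.isIn "(reverse)" rid != reverse_flag then none
  else fmrBucketDelims reaction_name rid delimiters 0

def find_matching_reactions_alt (reaction_ids : List String) (reaction_name : String) (reverse_flag : Bool) : List (String × Int) :=
  let delimiters := ["_", "[", "-", "/"]
  let exact_name := if reverse_flag then reaction_name ++ " (reverse)" else reaction_name
  let exact_ok := if reverse_flag then true else !PySem.Str.isIn "(reverse)" reaction_name
  let st :=
    (PySem.List.enumerate reaction_ids 0).foldl
      (fun (st : PySem.Set String × List (List (String × Int))) p =>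
        if st.1.contains p.2 then st
        else
          let seen := st.1.add p.2
          match fmrBucketOf reaction_name exact_name exact_ok reverse_flag delimiters p.2 with
          | some b => (seen, st.2.set b ((st.2.getD b []) ++ [(p.2, p.1)]))
          | none => (seen, st.2))
      (PySem.Set.empty, [[], [], [], [], []])
  st.2.foldl (fun out b => out ++ b) []

-- ===== PRECONDITION & SPEC =====
def Spec_find_matching_reactions (reaction_ids : List String) (reaction_name : String) (reverse_flag : Bool) (out : List (String × Int)) : Prop := out = find_matching_reactions_alt reaction_ids reaction_name reverse_flag
instance (reaction_ids : List String) (reaction_name : String) (reverse_flag : Bool) (out : List (String × Int)) : Decidable (Spec_find_matching_reactions reaction_ids reaction_name reverse_flag out) := by unfold Spec_find_matching_reactions; infer_instance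

-- ===== CLAIM (what is proved, stated in full; the proofs are below) =====
def Claim_equal_find_matching_reactions : Prop := ∀ (reaction_ids : List String) (reaction_name : String) (reverse_flag : Bool), Dom_find_matching_reactions reaction_ids reaction_name reverse_flag → Spec_find_matching_reactions reaction_ids reaction_name reverse_flag (find_matching_reactions reaction_ids reaction_name reverse_flag)

-- ===== LEMMAS AND PROOFS =====

def fmrScan (P : String → Bool) : List String → List String → Int → List (String × Int)
  | S, x :: t, i =>
    if P x && !S.contains x then (x, i) :: fmrScan P (x :: S) t (i + 1)
    else fmrScan P S t (i + 1)
  | _, [], _ => []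
def fmrFirsts : List String → List String → Int → List (String × Int)
  | S, x :: t, i =>
    if S.contains x then fmrFirsts S t (i + 1)
    else (x, i) :: fmrFirsts (x :: S) t (i + 1)
  | _, [], _ => []

lemma contains_cons' (S : List String) (x y : String) :
    (x :: S).contains y = ((y == x) || S.contains y) := List.contains_cons

lemma fmrScan_congr (P : String → Bool) :
    ∀ (l S S' : List String) (i : Int), (∀ x, S.contains x = S'.contains x) →
      fmrScan P S l i = fmrScan P S' l i := by
  intro l
  induction l with
  | nil => intro S S' i h; rfl
  | cons x t ih =>
    intro S S' i h
    simp only [fmrScan, h x]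
    cases hp : (P x && !S'.contains x)
    · simp only [Bool.false_eq_true, if_false, if_neg]
      exact ih S S' (i+1) h
    · simp only [if_pos]
      rw [ih]
      intro y; rw [contains_cons', contains_cons', h y]

lemma fmrScan_eq_filter (P Q : String → Bool) :
    ∀ (l S T : List String) (i : Int),
      (∀ x ∈ l, ((P x = true ∧ S.contains x = false) ↔ (Q x = true ∧ T.contains x = false))) →
      fmrScan P S l i = (fmrFirsts T l i).filter (fun p => Q p.1) := by
  intro l
  induction l with
  | nil => intro S T i h; rfl
  | cons x t ih =>
    intro S T i h
    have hx := h x (List.mem_cons_self)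
    have htail := fun y hy => h y (List.mem_cons_of_mem x hy)
    cases hT : T.contains x
    · cases hQ : Q x
      · -- x not emitted on either side (Q false forces P&&!S false)
        have hns : (P x && !S.contains x) = false := by
          cases hP : P x
          · simp
          · cases hS : S.contains x
            · exfalso
              have := hx.mp ⟨hP, hS⟩
              rw [hQ] at this; exact absurd this.1 (by simp)
            · simp [hS]
        simp only [fmrScan, fmrFirsts, hns, hT, Bool.false_eq_true, if_false, if_neg, List.filter_cons,
          hQ, decide_false]
        apply ih
        intro y hy
        rw [htail y hy]
        rw [contains_cons']
        cases hyx : (y == x)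
        · simp
        · have : y = x := beq_iff_eq.mp hyx
          subst this
          simp [hQ]
      · -- x emitted on both sides
        have hPS : P x = true ∧ S.contains x = false := hx.mpr ⟨hQ, hT⟩
        simp only [fmrScan, fmrFirsts, hPS.1, hPS.2, hT, Bool.not_false, Bool.and_self,
          if_pos, Bool.false_eq_true, if_false, if_neg, List.filter_cons, hQ, decide_true]
        congr 1
        apply ih
        intro y hy
        rw [contains_cons', contains_cons']
        cases hyx : (y == x)
        · simp only [hyx, Bool.false_or]; exact htail y hy
        · have hyx' : y = x := beq_iff_eq.mp hyx
          subst hyx'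
          simp
    · -- T already saw x: firsts skips; scan must not emit
      have hns : (P x && !S.contains x) = false := by
        cases hP : P x
        · simp
        · cases hS : S.contains x
          · exfalso
            have := hx.mp ⟨hP, hS⟩
            rw [hT] at this; exact absurd this.2 (by simp)
          · simp [hS]
      simp only [fmrScan, fmrFirsts, hns, hT, Bool.false_eq_true, if_false, if_neg, if_pos]
      exact ih S T (i+1) htail

lemma mem_fst_fmrFirsts :
    ∀ (l S : List String) (i : Int) (x : String),
      x ∈ (fmrFirsts S l i).map Prod.fst ↔ (x ∈ l ∧ S.contains x = false) := by
  intro l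
  induction l with
  | nil => intro S i x; simp [fmrFirsts]
  | cons y t ih =>
    intro S i x
    cases hS : S.contains y
    · simp only [fmrFirsts, hS, Bool.false_eq_true, if_false, if_neg, List.map_cons, List.mem_cons, ih,
        contains_cons', List.mem_cons]
      constructor
      · rintro (rfl | ⟨h1, h2⟩)
        · exact ⟨Or.inl rfl, hS⟩
        · simp only [Bool.or_eq_false_iff] at h2
          exact ⟨Or.inr h1, h2.2⟩
      · rintro ⟨h1, h2⟩
        rcases h1 with rfl | h1
        · exact Or.inl rfl
        · by_cases hxy : x = y
          · exact Or.inl hxy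
          · refine Or.inr ⟨h1, ?_⟩
            rw [Bool.or_eq_false_iff]
            exact ⟨by simp [hxy], h2⟩
    · simp only [fmrFirsts, hS, if_pos, ih, List.mem_cons]
      constructor
      · rintro ⟨h1, h2⟩; exact ⟨Or.inr h1, h2⟩
      · rintro ⟨h1, h2⟩
        rcases h1 with rfl | h1
        · rw [hS] at h2; cases h2
        · exact ⟨h1, h2⟩

lemma foldA_inner (P1 P2 : String → Bool) :
    ∀ (l : List String) (i : Int) (m : List (String × Int)),
      (PySem.List.enumerate l i).foldl (fun matching p =>
          if P1 p.2 && (P2 p.2 && !(matching.map Prod.fst).contains p.2)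
          then matching ++ [(p.2, p.1)] else matching) m
        = m ++ fmrScan (fun x => P1 x && P2 x) (m.map Prod.fst) l i := by
  intro l
  induction l with
  | nil => intro i m; simp [PySem.List.enumerate, fmrScan]
  | cons x t ih =>
    intro i m
    simp only [PySem.List.enumerate, List.foldl_cons]
    cases hc : (P1 x && (P2 x && !(m.map Prod.fst).contains x))
    · have hc' : ((fun x => P1 x && P2 x) x && !(m.map Prod.fst).contains x) = false := by
        cases h1 : P1 x <;> cases h2 : P2 x <;> simp_all
      simp only [fmrScan, hc', Bool.false_eq_true, if_false, if_neg, hc]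
      exact ih (i+1) m
    · have hc' : ((fun x => P1 x && P2 x) x && !(m.map Prod.fst).contains x) = true := by
        cases h1 : P1 x <;> cases h2 : P2 x <;> simp_all
      simp only [fmrScan, hc', if_pos, hc]
      rw [ih (i+1) (m ++ [(x, i)])]
      rw [List.append_assoc]
      congr 1
      rw [List.singleton_append]
      congr 1
      apply fmrScan_congr
      intro y
      rw [List.contains_cons]
      simp only [List.map_append, List.map_cons, List.map_nil]
      rw [List.contains_append, Bool.or_comm]
      congr 1
      rw [List.contains_cons]
      simp

lemma fmrSet_contains_add (s : PySem.Set String) (x y : String) (hx : s.contains x = false) :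
    (s.add x).contains y = ((y == x) || s.contains y) := by
  simp only [PySem.Set.add, hx, Bool.false_eq_true, if_false]
  rw [PySem.Set.contains_eq_listContains, PySem.Set.contains_eq_listContains,
    List.contains_append, Bool.or_comm]
  congr 1
  rw [List.contains_cons]
  simp

lemma foldB (rk : String → Option Nat) (hrk : ∀ x b, rk x = some b → b < 5) :
    ∀ (l : List String) (i : Int) (seen : PySem.Set String) (S : List String)
      (b0 b1 b2 b3 b4 : List (String × Int)),
      (∀ x, seen.contains x = S.contains x) →
      ((PySem.List.enumerate l i).foldl
        (fun (st : PySem.Set String × List (List (String × Int))) p =>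
          if st.1.contains p.2 then st
          else
            match rk p.2 with
            | some b => (st.1.add p.2, st.2.set b ((st.2.getD b []) ++ [(p.2, p.1)]))
            | none => (st.1.add p.2, st.2))
        (seen, [b0, b1, b2, b3, b4])).2
      = [b0 ++ (fmrFirsts S l i).filter (fun p => rk p.1 == some 0),
         b1 ++ (fmrFirsts S l i).filter (fun p => rk p.1 == some 1),
         b2 ++ (fmrFirsts S l i).filter (fun p => rk p.1 == some 2),
         b3 ++ (fmrFirsts S l i).filter (fun p => rk p.1 == some 3),
         b4 ++ (fmrFirsts S l i).filter (fun p => rk p.1 == some 4)] := by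
  intro l
  induction l with
  | nil => intro i seen S b0 b1 b2 b3 b4 h; simp [PySem.List.enumerate, fmrFirsts]
  | cons x t ih =>
    intro i seen S b0 b1 b2 b3 b4 h
    simp only [PySem.List.enumerate, List.foldl_cons]
    cases hc : S.contains x
    · have hseen : seen.contains x = false := by rw [h, hc]
      have hadd : ∀ y, (seen.add x).contains y = ((x : String) :: S).contains y := by
        intro y
        rw [fmrSet_contains_add seen x y hseen, List.contains_cons, h]
      simp only [hseen, Bool.false_eq_true, if_false]
      cases hrkx : rk x
      · -- no bucket: buckets unchanged, firsts adds x to seen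
        simp only [fmrFirsts, hc, Bool.false_eq_true, if_false]
        rw [ih (i+1) (seen.add x) (x :: S) b0 b1 b2 b3 b4 hadd]
        simp [List.filter_cons, hrkx]
      · rename_i b
        have hb5 := hrk x b hrkx
        have hfil : ∀ k : Nat, k ≠ b →
            (fmrFirsts S (x :: t) i).filter (fun p => rk p.1 == some k)
              = (fmrFirsts (x :: S) t (i+1)).filter (fun p => rk p.1 == some k) := by
          intro k hk
          simp only [fmrFirsts, hc, Bool.false_eq_true, if_false, List.filter_cons, hrkx]
          simp [Option.some.injEq, hk.symm]
        have hfilb :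
            (fmrFirsts S (x :: t) i).filter (fun p => rk p.1 == some b)
              = (x, i) :: (fmrFirsts (x :: S) t (i+1)).filter (fun p => rk p.1 == some b) := by
          simp only [fmrFirsts, hc, Bool.false_eq_true, if_false, List.filter_cons, hrkx]
          simp
        interval_cases b
        · simp only []
          rw [show (([b0, b1, b2, b3, b4] : List (List (String × Int))).set 0
              ((([b0, b1, b2, b3, b4] : List (List (String × Int))).getD 0 []) ++ [(x, i)])) = [b0 ++ [(x, i)], b1, b2, b3, b4] from rfl]
          rw [ih (i+1) (seen.add x) (x :: S) _ _ _ _ _ hadd, hfilb, hfil 1 (by omega), hfil 2 (by omega), hfil 3 (by omega), hfil 4 (by omega)]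
          simp [List.append_assoc]
        · simp only []
          rw [show (([b0, b1, b2, b3, b4] : List (List (String × Int))).set 1
              ((([b0, b1, b2, b3, b4] : List (List (String × Int))).getD 1 []) ++ [(x, i)])) = [b0, b1 ++ [(x, i)], b2, b3, b4] from rfl]
          rw [ih (i+1) (seen.add x) (x :: S) _ _ _ _ _ hadd, hfilb, hfil 0 (by omega), hfil 2 (by omega), hfil 3 (by omega), hfil 4 (by omega)]
          simp [List.append_assoc]
        · simp only []
          rw [show (([b0, b1, b2, b3, b4] : List (List (String × Int))).set 2
              ((([b0, b1, b2, b3, b4] : List (List (String × Int))).getD 2 []) ++ [(x, i)])) = [b0, b1, b2 ++ [(x, i)], b3, b4] from rfl]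
          rw [ih (i+1) (seen.add x) (x :: S) _ _ _ _ _ hadd, hfilb, hfil 0 (by omega), hfil 1 (by omega), hfil 3 (by omega), hfil 4 (by omega)]
          simp [List.append_assoc]
        · simp only []
          rw [show (([b0, b1, b2, b3, b4] : List (List (String × Int))).set 3
              ((([b0, b1, b2, b3, b4] : List (List (String × Int))).getD 3 []) ++ [(x, i)])) = [b0, b1, b2, b3 ++ [(x, i)], b4] from rfl]
          rw [ih (i+1) (seen.add x) (x :: S) _ _ _ _ _ hadd, hfilb, hfil 0 (by omega), hfil 1 (by omega), hfil 2 (by omega), hfil 4 (by omega)]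
          simp [List.append_assoc]
        · simp only []
          rw [show (([b0, b1, b2, b3, b4] : List (List (String × Int))).set 4
              ((([b0, b1, b2, b3, b4] : List (List (String × Int))).getD 4 []) ++ [(x, i)])) = [b0, b1, b2, b3, b4 ++ [(x, i)]] from rfl]
          rw [ih (i+1) (seen.add x) (x :: S) _ _ _ _ _ hadd, hfilb, hfil 0 (by omega), hfil 1 (by omega), hfil 2 (by omega), hfil 3 (by omega)]
          simp [List.append_assoc]
    · have hseen : seen.contains x = true := by rw [h, hc]
      simp only [hseen, if_pos]
      simp only [fmrFirsts, hc, if_pos]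
      exact ih (i+1) seen S b0 b1 b2 b3 b4 h

def fmrRkb (a f g0 g1 g2 g3 : Bool) : Option Nat :=
  if a then some 0
  else if !f then none
  else if g0 then some 1 else if g1 then some 2 else if g2 then some 3 else if g3 then some 4
  else none

lemma bucketOf_eq_rkb (name en : String) (ok rev : Bool) (x : String) :
    fmrBucketOf name en ok rev ["_", "[", "-", "/"] x
      = fmrRkb (ok && x == en) (PySem.Str.isIn "(reverse)" x == rev)
          (PySem.Str.isIn (name ++ "_") x) (PySem.Str.isIn (name ++ "[") x)
          (PySem.Str.isIn (name ++ "-") x) (PySem.Str.isIn (name ++ "/") x) := by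
  simp only [fmrBucketOf, fmrBucketDelims, fmrRkb]
  cases ha : (ok && x == en) <;>
  cases hq : PySem.Str.isIn "(reverse)" x <;>
  cases rev <;> simp [bne]

lemma fmrRkb_lt (a f g0 g1 g2 g3 : Bool) (b : Nat) (h : fmrRkb a f g0 g1 g2 g3 = some b) :
    b < 5 := by
  have : fmrRkb a f g0 g1 g2 g3 = none ∨ fmrRkb a f g0 g1 g2 g3 = some 0 ∨
      fmrRkb a f g0 g1 g2 g3 = some 1 ∨ fmrRkb a f g0 g1 g2 g3 = some 2 ∨
      fmrRkb a f g0 g1 g2 g3 = some 3 ∨ fmrRkb a f g0 g1 g2 g3 = some 4 := by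
    cases a <;> cases f <;> cases g0 <;> cases g1 <;> cases g2 <;> cases g3 <;> simp [fmrRkb]
  rcases this with h' | h' | h' | h' | h' | h' <;> rw [h'] at h <;> (try cases h) <;> omega

lemma fmrRkb_zero (a f g0 g1 g2 g3 : Bool) : (fmrRkb a f g0 g1 g2 g3 == some 0) = a := by
  cases a <;> cases f <;> cases g0 <;> cases g1 <;> cases g2 <;> cases g3 <;> decide

lemma fmrTaut1 (a f g0 g1 g2 g3 : Bool) :
    ((g0 && f) = true ∧ (fmrRkb a f g0 g1 g2 g3 == some 0) = false)
      ↔ (fmrRkb a f g0 g1 g2 g3 == some 1) = true := by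
  cases a <;> cases f <;> cases g0 <;> cases g1 <;> cases g2 <;> cases g3 <;> decide

lemma fmrTaut2 (a f g0 g1 g2 g3 : Bool) :
    ((g1 && f) = true ∧ ((fmrRkb a f g0 g1 g2 g3 == some 0) = false ∧
        (fmrRkb a f g0 g1 g2 g3 == some 1) = false))
      ↔ (fmrRkb a f g0 g1 g2 g3 == some 2) = true := by
  cases a <;> cases f <;> cases g0 <;> cases g1 <;> cases g2 <;> cases g3 <;> decide

lemma fmrTaut3 (a f g0 g1 g2 g3 : Bool) :
    ((g2 && f) = true ∧ ((fmrRkb a f g0 g1 g2 g3 == some 0) = false ∧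
        (fmrRkb a f g0 g1 g2 g3 == some 1) = false ∧ (fmrRkb a f g0 g1 g2 g3 == some 2) = false))
      ↔ (fmrRkb a f g0 g1 g2 g3 == some 3) = true := by
  cases a <;> cases f <;> cases g0 <;> cases g1 <;> cases g2 <;> cases g3 <;> decide

lemma fmrTaut4 (a f g0 g1 g2 g3 : Bool) :
    ((g3 && f) = true ∧ ((fmrRkb a f g0 g1 g2 g3 == some 0) = false ∧
        (fmrRkb a f g0 g1 g2 g3 == some 1) = false ∧ (fmrRkb a f g0 g1 g2 g3 == some 2) = false ∧
        (fmrRkb a f g0 g1 g2 g3 == some 3) = false))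
      ↔ (fmrRkb a f g0 g1 g2 g3 == some 4) = true := by
  cases a <;> cases f <;> cases g0 <;> cases g1 <;> cases g2 <;> cases g3 <;> decide

lemma mem_fst_filter (L : List (String × Int)) (q : String → Bool) (x : String) :
    x ∈ (L.filter (fun p => q p.1)).map Prod.fst ↔ (q x = true ∧ x ∈ L.map Prod.fst) := by
  simp only [List.mem_map, List.mem_filter]
  constructor
  · rintro ⟨p, ⟨hp, hq⟩, rfl⟩; exact ⟨hq, p, hp, rfl⟩
  · rintro ⟨hq, p, hp, rfl⟩; exact ⟨p, ⟨hp, hq⟩, rfl⟩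

lemma fmrFilter_none (en : String) (ok : Bool) (l S : List String) (i : Int)
    (h : S.contains en = true) :
    (fmrFirsts S l i).filter (fun p => ok && p.1 == en) = [] := by
  rw [List.filter_eq_nil_iff]
  rintro ⟨y, j⟩ hp hq
  simp only [Bool.and_eq_true, beq_iff_eq] at hq
  have : y ∈ (fmrFirsts S l i).map Prod.fst := List.mem_map.mpr ⟨(y, j), hp, rfl⟩
  rw [mem_fst_fmrFirsts] at this
  rw [hq.2] at this
  rw [h] at this
  exact absurd this.2 (by simp)

lemma fmrExact (en : String) :
    ∀ (l S : List String) (i : Int), S.contains en = false →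
      (fmrFirsts S l i).filter (fun p => p.1 == en)
        = match PySem.List.index? l en with
          | some j => [(en, i + (j : Int))]
          | none => [] := by
  intro l
  induction l with
  | nil => intro S i h; simp [fmrFirsts, PySem.List.index?, List.idxOf?]
  | cons x t ih =>
    intro S i h
    simp only [PySem.List.index?, List.idxOf?_cons]
    cases hx : (x == en)
    · have hxe : x ≠ en := by simpa using hx
      simp only [Bool.false_eq_true, if_false]
      cases hS : S.contains x
      · simp only [fmrFirsts, hS, Bool.false_eq_true, if_false, List.filter_cons, hx]
        have hS' : (x :: S).contains en = false := by
          rw [List.contains_cons]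
          simp only [Bool.or_eq_false_iff]
          refine ⟨by simp only [beq_eq_false_iff_ne, ne_eq]; exact fun hh => hxe hh.symm, h⟩
        rw [ih (x :: S) (i+1) hS']
        cases hidx : PySem.List.index? t en
        · simp only [PySem.List.index?] at hidx
          rw [hidx]
          simp
        · rename_i j
          simp only [PySem.List.index?] at hidx
          rw [hidx]
          simp only [Option.map_some]
          congr 2
          push_cast
          ring
      · simp only [fmrFirsts, hS, if_pos]
        rw [ih S (i+1) h]
        cases hidx : PySem.List.index? t en
        · simp only [PySem.List.index?] at hidx; rw [hidx]; simp
        · rename_i j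
          simp only [PySem.List.index?] at hidx; rw [hidx]
          simp only [Option.map_some]
          congr 2
          push_cast
          ring
    · have hxe : x = en := beq_iff_eq.mp hx
      subst hxe
      simp only [fmrFirsts, h, Bool.false_eq_true, if_false, if_pos, List.filter_cons,
        BEq.rfl, decide_true]
      have : (x :: S).contains x = true := by rw [List.contains_cons]; simp
      have hnil : (fmrFirsts (x :: S) t (i+1)).filter (fun p => p.1 == x) = [] := by
        have := fmrFilter_none x true t (x :: S) (i+1) this
        simpa using this
      rw [hnil]
      simp

lemma step1_eq (en : String) (ok : Bool) (l : List String) :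
    (if l.contains en && ok then
       match PySem.List.index? l en with
       | some idx => [(en, (idx : Int))]
       | none => []
     else ([] : List (String × Int)))
    = (fmrFirsts [] l 0).filter (fun p => ok && p.1 == en) := by
  cases ok
  · simp
  · simp only [Bool.and_true, Bool.true_and]
    rw [fmrExact en l [] 0 rfl]
    cases hc : l.contains en
    · have : PySem.List.index? l en = none := by
        rw [PySem.List.index?_eq_none_iff]
        intro hmem
        rw [List.contains_iff_mem.mpr hmem] at hc
        cases hc
      rw [this]
      simp
    · rcases ho : PySem.List.index? l en with _ | j
      · rw [PySem.List.index?_eq_none_iff] at ho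
        exact absurd (List.contains_iff_mem.mp hc) ho
      · simp only [if_pos, ho]
        norm_num

lemma fmrCore (l : List String) (n en : String) (ok rev : Bool) (P2 : String → Bool)
    (hP2 : ∀ x, P2 x = (PySem.Str.isIn "(reverse)" x == rev))
    (m0 : List (String × Int))
    (hm0 : m0 = (fmrFirsts [] l 0).filter
        (fun p => fmrBucketOf n en ok rev ["_", "[", "-", "/"] p.1 == some 0)) :
    (["_", "[", "-", "/"]).foldl (fun matching d =>
        (PySem.List.enumerate l 0).foldl (fun matching p =>
          if PySem.Str.isIn (n ++ d) p.2 && (P2 p.2 && !(matching.map Prod.fst).contains p.2)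
          then matching ++ [(p.2, p.1)] else matching) matching) m0
      = ((((fmrFirsts [] l 0).filter (fun p => fmrBucketOf n en ok rev ["_", "[", "-", "/"] p.1 == some 0)
          ++ (fmrFirsts [] l 0).filter (fun p => fmrBucketOf n en ok rev ["_", "[", "-", "/"] p.1 == some 1))
          ++ (fmrFirsts [] l 0).filter (fun p => fmrBucketOf n en ok rev ["_", "[", "-", "/"] p.1 == some 2))
          ++ (fmrFirsts [] l 0).filter (fun p => fmrBucketOf n en ok rev ["_", "[", "-", "/"] p.1 == some 3))
          ++ (fmrFirsts [] l 0).filter (fun p => fmrBucketOf n en ok rev ["_", "[", "-", "/"] p.1 == some 4) := by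
  have hmem : ∀ (m : List (String × Int)) (ks : List Nat) (x : String),
      m = ks.foldr (fun k acc => (fmrFirsts [] l 0).filter
          (fun p => fmrBucketOf n en ok rev ["_", "[", "-", "/"] p.1 == some k) ++ acc) [] →
      ((m.map Prod.fst).contains x = false ↔
        ∀ k ∈ ks, ¬ ((fmrBucketOf n en ok rev ["_", "[", "-", "/"] x == some k) = true ∧ x ∈ l)) := by
    intro m ks x hm
    subst hm
    induction ks with
    | nil => simp
    | cons k t ihk =>
      simp only [List.foldr_cons, List.map_append, List.contains_append, Bool.or_eq_false_iff,
        List.mem_cons]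
      constructor
      · rintro ⟨h1, h2⟩ k' hk'
        rcases hk' with rfl | hk'
        · intro ⟨hb, hxl⟩
          have : x ∈ (List.filter (fun p => fmrBucketOf n en ok rev ["_", "[", "-", "/"] p.1 == some k') (fmrFirsts [] l 0)).map Prod.fst := by
            rw [mem_fst_filter _ (fun y => fmrBucketOf n en ok rev ["_", "[", "-", "/"] y == some k') x, mem_fst_fmrFirsts]
            exact ⟨hb, hxl, rfl⟩
          rw [List.contains_iff_mem.mpr this] at h1
          cases h1
        · exact (ihk.mp h2) k' hk'
      · intro hall
        constructor
        · cases hcc : (List.map Prod.fst (List.filter (fun p => fmrBucketOf n en ok rev ["_", "[", "-", "/"] p.1 == some k) (fmrFirsts [] l 0))).contains x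
          · rfl
          · exfalso
            have := List.contains_iff_mem.mp hcc
            rw [mem_fst_filter _ (fun y => fmrBucketOf n en ok rev ["_", "[", "-", "/"] y == some k) x, mem_fst_fmrFirsts] at this
            exact hall k (Or.inl rfl) ⟨this.1, this.2.1⟩
        · exact ihk.mpr (fun k' hk' => hall k' (Or.inr hk'))
  have hrkx := fun x => bucketOf_eq_rkb n en ok rev x
  have hinv1 : ∀ x ∈ l, ((PySem.Str.isIn (n ++ "_") x && P2 x) = true ∧ ((m0).map Prod.fst).contains x = false) ↔
      ((fmrBucketOf n en ok rev ["_", "[", "-", "/"] x == some 1) = true ∧ (([] : List String).contains x = false)) := by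
    intro x hx
    rw [hmem (m0) [0] x (by rw [hm0]; simp)]
    simp only [List.mem_cons, List.mem_singleton, List.not_mem_nil, or_false, forall_eq_or_imp,
      forall_eq, hx, and_true, List.contains_nil, Bool.not_eq_true]
    rw [hP2 x, hrkx x]
    exact fmrTaut1 (ok && x == en) (PySem.Str.isIn "(reverse)" x == rev)
      (PySem.Str.isIn (n ++ "_") x) (PySem.Str.isIn (n ++ "[") x)
      (PySem.Str.isIn (n ++ "-") x) (PySem.Str.isIn (n ++ "/") x)
  have hinv2 : ∀ x ∈ l, ((PySem.Str.isIn (n ++ "[") x && P2 x) = true ∧ ((m0 ++ (fmrFirsts [] l 0).filter (fun p => fmrBucketOf n en ok rev ["_", "[", "-", "/"] p.1 == some 1)).map Prod.fst).contains x = false) ↔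
      ((fmrBucketOf n en ok rev ["_", "[", "-", "/"] x == some 2) = true ∧ (([] : List String).contains x = false)) := by
    intro x hx
    rw [hmem (m0 ++ (fmrFirsts [] l 0).filter (fun p => fmrBucketOf n en ok rev ["_", "[", "-", "/"] p.1 == some 1)) [0, 1] x (by rw [hm0]; simp)]
    simp only [List.mem_cons, List.mem_singleton, List.not_mem_nil, or_false, forall_eq_or_imp,
      forall_eq, hx, and_true, List.contains_nil, Bool.not_eq_true]
    rw [hP2 x, hrkx x]
    exact fmrTaut2 (ok && x == en) (PySem.Str.isIn "(reverse)" x == rev)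
      (PySem.Str.isIn (n ++ "_") x) (PySem.Str.isIn (n ++ "[") x)
      (PySem.Str.isIn (n ++ "-") x) (PySem.Str.isIn (n ++ "/") x)
  have hinv3 : ∀ x ∈ l, ((PySem.Str.isIn (n ++ "-") x && P2 x) = true ∧ ((m0 ++ (fmrFirsts [] l 0).filter (fun p => fmrBucketOf n en ok rev ["_", "[", "-", "/"] p.1 == some 1) ++ (fmrFirsts [] l 0).filter (fun p => fmrBucketOf n en ok rev ["_", "[", "-", "/"] p.1 == some 2)).map Prod.fst).contains x = false) ↔
      ((fmrBucketOf n en ok rev ["_", "[", "-", "/"] x == some 3) = true ∧ (([] : List String).contains x = false)) := by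
    intro x hx
    rw [hmem (m0 ++ (fmrFirsts [] l 0).filter (fun p => fmrBucketOf n en ok rev ["_", "[", "-", "/"] p.1 == some 1) ++ (fmrFirsts [] l 0).filter (fun p => fmrBucketOf n en ok rev ["_", "[", "-", "/"] p.1 == some 2)) [0, 1, 2] x (by rw [hm0]; simp)]
    simp only [List.mem_cons, List.mem_singleton, List.not_mem_nil, or_false, forall_eq_or_imp,
      forall_eq, hx, and_true, List.contains_nil, Bool.not_eq_true]
    rw [hP2 x, hrkx x]
    exact fmrTaut3 (ok && x == en) (PySem.Str.isIn "(reverse)" x == rev)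
      (PySem.Str.isIn (n ++ "_") x) (PySem.Str.isIn (n ++ "[") x)
      (PySem.Str.isIn (n ++ "-") x) (PySem.Str.isIn (n ++ "/") x)
  have hinv4 : ∀ x ∈ l, ((PySem.Str.isIn (n ++ "/") x && P2 x) = true ∧ ((m0 ++ (fmrFirsts [] l 0).filter (fun p => fmrBucketOf n en ok rev ["_", "[", "-", "/"] p.1 == some 1) ++ (fmrFirsts [] l 0).filter (fun p => fmrBucketOf n en ok rev ["_", "[", "-", "/"] p.1 == some 2) ++ (fmrFirsts [] l 0).filter (fun p => fmrBucketOf n en ok rev ["_", "[", "-", "/"] p.1 == some 3)).map Prod.fst).contains x = false) ↔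
      ((fmrBucketOf n en ok rev ["_", "[", "-", "/"] x == some 4) = true ∧ (([] : List String).contains x = false)) := by
    intro x hx
    rw [hmem (m0 ++ (fmrFirsts [] l 0).filter (fun p => fmrBucketOf n en ok rev ["_", "[", "-", "/"] p.1 == some 1) ++ (fmrFirsts [] l 0).filter (fun p => fmrBucketOf n en ok rev ["_", "[", "-", "/"] p.1 == some 2) ++ (fmrFirsts [] l 0).filter (fun p => fmrBucketOf n en ok rev ["_", "[", "-", "/"] p.1 == some 3)) [0, 1, 2, 3] x (by rw [hm0]; simp)]
    simp only [List.mem_cons, List.mem_singleton, List.not_mem_nil, or_false, forall_eq_or_imp,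
      forall_eq, hx, and_true, List.contains_nil, Bool.not_eq_true]
    rw [hP2 x, hrkx x]
    exact fmrTaut4 (ok && x == en) (PySem.Str.isIn "(reverse)" x == rev)
      (PySem.Str.isIn (n ++ "_") x) (PySem.Str.isIn (n ++ "[") x)
      (PySem.Str.isIn (n ++ "-") x) (PySem.Str.isIn (n ++ "/") x)
  simp only [List.foldl_cons, List.foldl_nil]
  rw [foldA_inner (fun x => PySem.Str.isIn (n ++ "_") x) P2 l 0 m0,
    fmrScan_eq_filter (fun x => PySem.Str.isIn (n ++ "_") x && P2 x)
      (fun y => fmrBucketOf n en ok rev ["_", "[", "-", "/"] y == some 1) l _ [] 0 hinv1]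
  rw [foldA_inner (fun x => PySem.Str.isIn (n ++ "[") x) P2 l 0 _,
    fmrScan_eq_filter (fun x => PySem.Str.isIn (n ++ "[") x && P2 x)
      (fun y => fmrBucketOf n en ok rev ["_", "[", "-", "/"] y == some 2) l _ [] 0 hinv2]
  rw [foldA_inner (fun x => PySem.Str.isIn (n ++ "-") x) P2 l 0 _,
    fmrScan_eq_filter (fun x => PySem.Str.isIn (n ++ "-") x && P2 x)
      (fun y => fmrBucketOf n en ok rev ["_", "[", "-", "/"] y == some 3) l _ [] 0 hinv3]
  rw [foldA_inner (fun x => PySem.Str.isIn (n ++ "/") x) P2 l 0 _,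
    fmrScan_eq_filter (fun x => PySem.Str.isIn (n ++ "/") x && P2 x)
      (fun y => fmrBucketOf n en ok rev ["_", "[", "-", "/"] y == some 4) l _ [] 0 hinv4]
  rw [hm0]

lemma fmr_hrk (n en : String) (ok rev : Bool) :
    ∀ (x : String) (b : Nat), fmrBucketOf n en ok rev ["_", "[", "-", "/"] x = some b → b < 5 := by
  intro x b h
  rw [bucketOf_eq_rkb] at h
  exact fmrRkb_lt _ _ _ _ _ _ _ h

lemma fmr_filter0 (l : List String) (n en : String) (ok rev : Bool) :
    (fmrFirsts [] l 0).filter (fun p => ok && p.1 == en)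
      = (fmrFirsts [] l 0).filter (fun p => fmrBucketOf n en ok rev ["_", "[", "-", "/"] p.1 == some 0) := by
  apply List.filter_congr
  intro p _
  rw [bucketOf_eq_rkb, fmrRkb_zero]

theorem fmr_eq_rev (l : List String) (n : String) :
    (["_", "[", "-", "/"]).foldl (fun matching delimiter =>
        (PySem.List.enumerate l 0).foldl (fun matching p =>
          if PySem.Str.isIn (n ++ delimiter) p.2 &&
             (PySem.Str.isIn "(reverse)" p.2 && !(matching.map Prod.fst).contains p.2)
          then matching ++ [(p.2, p.1)] else matching) matching)
      (if l.contains (n ++ " (reverse)") then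
          match PySem.List.index? l (n ++ " (reverse)") with
          | some idx => [(n ++ " (reverse)", (idx : Int))]
          | none => []
        else [])
    = ((PySem.List.enumerate l 0).foldl
        (fun (st : PySem.Set String × List (List (String × Int))) p =>
          if st.1.contains p.2 then st
          else
            match fmrBucketOf n (n ++ " (reverse)") true true ["_", "[", "-", "/"] p.2 with
            | some b => (st.1.add p.2, st.2.set b ((st.2.getD b []) ++ [(p.2, p.1)]))
            | none => (st.1.add p.2, st.2))
        (PySem.Set.empty, [[], [], [], [], []])).2.foldl (fun out b => out ++ b) [] := by
  rw [foldB (fmrBucketOf n (n ++ " (reverse)") true true ["_", "[", "-", "/"])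
    (fmr_hrk n (n ++ " (reverse)") true true) l 0 PySem.Set.empty [] [] [] [] [] []
    (fun x => rfl)]
  have hguard : (l.contains (n ++ " (reverse)")) = (l.contains (n ++ " (reverse)") && true) :=
    (Bool.and_true _).symm
  rw [hguard, step1_eq (n ++ " (reverse)") true l, fmr_filter0 l n (n ++ " (reverse)") true true]
  rw [fmrCore l n (n ++ " (reverse)") true true (fun x => PySem.Str.isIn "(reverse)" x)
    (fun x => by simp) _ rfl]
  simp only [List.foldl_cons, List.foldl_nil, List.nil_append]

theorem fmr_eq_fwd (l : List String) (n : String) :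
    (["_", "[", "-", "/"]).foldl (fun matching delimiter =>
        (PySem.List.enumerate l 0).foldl (fun matching p =>
          if PySem.Str.isIn (n ++ delimiter) p.2 &&
             (!PySem.Str.isIn "(reverse)" p.2 && !(matching.map Prod.fst).contains p.2)
          then matching ++ [(p.2, p.1)] else matching) matching)
      (if l.contains n && !PySem.Str.isIn "(reverse)" n then
          match PySem.List.index? l n with
          | some idx => [(n, (idx : Int))]
          | none => []
        else [])
    = ((PySem.List.enumerate l 0).foldl
        (fun (st : PySem.Set String × List (List (String × Int))) p =>
          if st.1.contains p.2 then st
          else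
            match fmrBucketOf n n (!PySem.Str.isIn "(reverse)" n) false ["_", "[", "-", "/"] p.2 with
            | some b => (st.1.add p.2, st.2.set b ((st.2.getD b []) ++ [(p.2, p.1)]))
            | none => (st.1.add p.2, st.2))
        (PySem.Set.empty, [[], [], [], [], []])).2.foldl (fun out b => out ++ b) [] := by
  rw [foldB (fmrBucketOf n n (!PySem.Str.isIn "(reverse)" n) false ["_", "[", "-", "/"])
    (fmr_hrk n n (!PySem.Str.isIn "(reverse)" n) false) l 0 PySem.Set.empty [] [] [] [] [] []
    (fun x => rfl)]
  rw [step1_eq n (!PySem.Str.isIn "(reverse)" n) l,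
    fmr_filter0 l n n (!PySem.Str.isIn "(reverse)" n) false]
  rw [fmrCore l n n (!PySem.Str.isIn "(reverse)" n) false (fun x => !PySem.Str.isIn "(reverse)" x)
    (fun x => by simp) _ rfl]
  simp only [List.foldl_cons, List.foldl_nil, List.nil_append]

-- ===== VERDICT (by name: the statement is the Claim_ definition above) =====
theorem find_matching_reactions_spec : Claim_equal_find_matching_reactions := by
  intro reaction_ids reaction_name reverse_flag _
  unfold Spec_find_matching_reactions
  cases reverse_flag
  · exact fmr_eq_fwd reaction_ids reaction_name
  · exact fmr_eq_rev reaction_ids reaction_name
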